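-- pv_equiv track=rewrite | github.com/lkun45598-lgtm/Wave_movie | Ocean-Agent-SDK_core/scripts/evaluate_bohai_full_predictions.py | case_boundaries
-- ===== SOURCE A (Python) =====
-- def case_boundaries(per_frame: list[dict[str, object]]) -> tuple[list[int], list[int], list[str]]:
--     starts: list[int] = []
--     centers: list[int] = []
--     labels: list[str] = []
--     current_case: str | None = None
--     start = 0
--     for idx, row in enumerate(per_frame):
--         case = str(row["case"])
--         if current_case is None:
--             current_case = case
--             start = idx
--         elif case != current_case:
--             starts.append(idx)
--             centers.append((start + idx - 1) // 2)
--             labels.append(current_case.replace("S1_", ""))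
--             current_case = case
--             start = idx
--     if current_case is not None:
--         centers.append((start + len(per_frame) - 1) // 2)
--         labels.append(current_case.replace("S1_", ""))
--     return starts, centers, labels
-- ===== SOURCE B (Python) =====
-- def case_boundaries(per_frame: list[dict[str, object]]) -> tuple[list[int], list[int], list[str]]:
--     cases = [str(row["case"]) for row in per_frame]
--     if not cases:
--         return [], [], []
--     pairs = list(zip(cases, cases[1:]))
--     starts = [i for i, (prev, cur) in enumerate(pairs, 1) if cur != prev]
--     bounds = [0] + starts + [len(cases)]
--     centers = [(a + b - 1) // 2 for a, b in zip(bounds, bounds[1:])]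
--     firsts = [cases[0]] + [cur for prev, cur in pairs if cur != prev]
--     labels = [c.replace("S1_", "") for c in firsts]
--     return starts, centers, labels
-- ===== Notes on version B (the rewrite author's own statement) =====
-- stated objective: alternative
-- what changed: Replaces A's stateful run-tracking scan (current_case/start with a trailing flush) by pairwise change-point detection: zip adjacent cases to find change indices, pad them with 0 and len(cases) into boundaries, and take centers from consecutive boundary pairs and labels from the first element of each segment.
import Mathlib
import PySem

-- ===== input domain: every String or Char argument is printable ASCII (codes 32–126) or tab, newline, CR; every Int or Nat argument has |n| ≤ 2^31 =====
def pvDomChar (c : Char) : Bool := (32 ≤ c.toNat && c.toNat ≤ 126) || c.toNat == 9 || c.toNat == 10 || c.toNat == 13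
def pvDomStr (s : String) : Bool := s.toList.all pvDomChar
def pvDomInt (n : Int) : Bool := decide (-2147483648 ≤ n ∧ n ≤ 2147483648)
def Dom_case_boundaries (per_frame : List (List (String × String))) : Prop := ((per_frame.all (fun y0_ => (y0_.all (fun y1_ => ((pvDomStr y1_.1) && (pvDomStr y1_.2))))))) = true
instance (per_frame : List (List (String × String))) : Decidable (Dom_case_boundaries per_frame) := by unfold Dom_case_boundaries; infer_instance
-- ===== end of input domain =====

-- B replaces A's stateful run-tracking scan by pairwise change-point detection: zip adjacent
-- cases, pad the change indices with 0 and len(cases) into boundaries, derive centers from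
-- consecutive boundary pairs and labels from each segment's first case (objective: alternative).

-- ===== PORT A =====
-- str(row["case"]): the value is a string, str is the identity; dict lookup = first match in the association list.
def pvCaseOfA (row : List (String × String)) : String :=
  ((PySem.Dict.mk row).get? "case").getD ""

-- loop body of A, state = (starts, centers, labels, current_case, start)
def pvAStep (st : List Int × List Int × List String × Option String × Int)
    (p : Int × List (String × String)) : List Int × List Int × List String × Option String × Int :=
  let case_ := pvCaseOfA p.2
  match st with
  | (starts, centers, labels, none, _) => (starts, centers, labels, some case_, p.1)
  | (starts, centers, labels, some cc, start) =>
    if case_ ≠ cc then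
      (starts ++ [p.1], centers ++ [PySem.Int.floordiv (start + p.1 - 1) 2],
       labels ++ [PySem.Str.replace cc "S1_" ""], some case_, p.1)
    else (starts, centers, labels, some cc, start)

def case_boundaries (per_frame : List (List (String × String))) : List Int × List Int × List String :=
  match (PySem.List.enumerate per_frame).foldl pvAStep ([], [], [], none, 0) with
  | (starts, centers, labels, none, _) => (starts, centers, labels)
  | (starts, centers, labels, some cc, start) =>
    (starts,
     centers ++ [PySem.Int.floordiv (start + (per_frame.length : Int) - 1) 2],
     labels ++ [PySem.Str.replace cc "S1_" ""])

-- ===== PORT B =====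
def pvCaseOfB (row : List (String × String)) : String :=
  ((PySem.Dict.mk row).get? "case").getD ""

def case_boundaries_alt (per_frame : List (List (String × String))) : List Int × List Int × List String :=
  let cases := per_frame.map pvCaseOfB
  match cases with
  | [] => ([], [], [])
  | c0 :: _ =>
    let pairs := cases.zip (cases.drop 1)
    let starts := (PySem.List.enumerate pairs 1).filterMap
      (fun q => if q.2.2 ≠ q.2.1 then some q.1 else none)
    let bounds := 0 :: starts ++ [(cases.length : Int)]
    let centers := (bounds.zip (bounds.drop 1)).map
      (fun q => PySem.Int.floordiv (q.1 + q.2 - 1) 2)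
    let firsts := c0 :: pairs.filterMap (fun q => if q.2 ≠ q.1 then some q.2 else none)
    let labels := firsts.map (fun c => PySem.Str.replace c "S1_" "")
    (starts, centers, labels)

-- ===== PRECONDITION & SPEC =====
-- Pre_ excludes exactly the inputs on which A raises KeyError: a row without a "case" key.
def Pre_case_boundaries (per_frame : List (List (String × String))) : Prop :=
  (per_frame.all (fun row => row.any (fun p => p.1 == "case"))) = true
instance (per_frame : List (List (String × String))) : Decidable (Pre_case_boundaries per_frame) := by
  unfold Pre_case_boundaries; infer_instance

def pvWitness_case_boundaries : (List (List (String × String))) :=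
  [[("case", "S1_a")], [("case", "S1_a")], [("case", "b")]]

def Spec_case_boundaries (per_frame : List (List (String × String))) (out : List Int × List Int × List String) : Prop := out = case_boundaries_alt per_frame
instance (per_frame : List (List (String × String))) (out : List Int × List Int × List String) : Decidable (Spec_case_boundaries per_frame out) := by unfold Spec_case_boundaries; infer_instance

-- ===== CLAIM (what is proved, stated in full; the proofs are below) =====
def Claim_equal_case_boundaries : Prop := ∀ (per_frame : List (List (String × String))), Dom_case_boundaries per_frame → Pre_case_boundaries per_frame → Spec_case_boundaries per_frame (case_boundaries per_frame)

-- ===== LEMMAS AND PROOFS =====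

-- proof-side helper: maximal runs (value, start, length) of a list of case strings
def pvRuns : List String → Int → List (String × Int × Int)
  | [], _ => []
  | c :: rest, pos =>
    let n : Int := 1 + (rest.takeWhile (· == c)).length
    (c, pos, n) :: pvRuns (rest.dropWhile (· == c)) (pos + n)
  termination_by l => l.length
  decreasing_by
    simp only [List.length_cons]
    exact Nat.lt_succ_of_le (List.length_dropWhile_le _ _)

-- the triple both programs compute, expressed over the run list (bridge between the proofs)
def pvRunsOut (cases : List String) : List Int × List Int × List String :=
  let runs := pvRuns cases 0
  ((runs.drop 1).map (fun r => r.2.1),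
   runs.map (fun r => PySem.Int.floordiv (2 * r.2.1 + r.2.2 - 1) 2),
   runs.map (fun r => PySem.Str.replace r.1 "S1_" ""))

-- change indices (chg p l i = indices of elements of l differing from their predecessor, prev = p)
def pvChg : String → List String → Int → List Int
  | _, [], _ => []
  | p, c :: rest, i => if c ≠ p then i :: pvChg c rest (i + 1) else pvChg p rest (i + 1)

-- first element of each segment after the initial one
def pvFch : String → List String → List String
  | _, [] => []
  | p, c :: rest => if c ≠ p then c :: pvFch c rest else pvFch p rest

-- A's step only looks at the case string of the row
def pvStepC (st : List Int × List Int × List String × Option String × Int)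
    (p : Int × String) : List Int × List Int × List String × Option String × Int :=
  match st with
  | (starts, centers, labels, none, _) => (starts, centers, labels, some p.2, p.1)
  | (starts, centers, labels, some cc, start) =>
    if p.2 ≠ cc then
      (starts ++ [p.1], centers ++ [PySem.Int.floordiv (start + p.1 - 1) 2],
       labels ++ [PySem.Str.replace cc "S1_" ""], some p.2, p.1)
    else (starts, centers, labels, some cc, start)

theorem pvAStep_eq (st : List Int × List Int × List String × Option String × Int)
    (p : Int × List (String × String)) : pvAStep st p = pvStepC st (p.1, pvCaseOfA p.2) := by
  obtain ⟨S, C, L, o, s⟩ := st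
  cases o <;> rfl

theorem foldl_enumerate_map (l : List (List (String × String))) (i : Int)
    (st : List Int × List Int × List String × Option String × Int) :
    (PySem.List.enumerate l i).foldl pvAStep st
      = (PySem.List.enumerate (l.map pvCaseOfA) i).foldl pvStepC st := by
  induction l generalizing i st with
  | nil => rfl
  | cons r rs ih =>
    simp only [List.map_cons, PySem.List.enumerate_cons, List.foldl_cons, pvAStep_eq]
    exact ih _ _

-- skipping a run: elements equal to the current case leave the state unchanged
theorem foldl_skip (xs : List String) (i : Int) (cc : String) (h : ∀ x ∈ xs, x = cc)
    (S : List Int) (C : List Int) (L : List String) (s : Int) :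
    (PySem.List.enumerate xs i).foldl pvStepC (S, C, L, some cc, s) = (S, C, L, some cc, s) := by
  induction xs generalizing i with
  | nil => rfl
  | cons x xs ih =>
    simp only [PySem.List.enumerate_cons, List.foldl_cons]
    have hx : x = cc := h x (by simp)
    have : pvStepC (S, C, L, some cc, s) (i, x) = (S, C, L, some cc, s) := by
      simp [pvStepC, hx]
    rw [this]
    exact ih (i + 1) (fun y hy => h y (List.mem_cons_of_mem x hy))

-- the A-side closing step applied to a fold result, with N the total length
def pvClose (N : Int) (st : List Int × List Int × List String × Option String × Int) :
    List Int × List Int × List String :=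
  match st with
  | (starts, centers, labels, none, _) => (starts, centers, labels)
  | (starts, centers, labels, some cc, start) =>
    (starts,
     centers ++ [PySem.Int.floordiv (start + N - 1) 2],
     labels ++ [PySem.Str.replace cc "S1_" ""])

-- main invariant of A's fold, phrased over the run list
theorem pvMainAux : ∀ (n : Nat) (cases : List String), cases.length = n →
    ∀ (N i s : Int) (cc : String) (S C : List Int) (L : List String),
    N = i + cases.length →
    pvClose N ((PySem.List.enumerate cases i).foldl pvStepC (S, C, L, some cc, s))
      = (S ++ (pvRuns (cases.dropWhile (· == cc)) (i + (cases.takeWhile (· == cc)).length)).map (fun r => r.2.1),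
         C ++ (((cc, s, i + ((cases.takeWhile (· == cc)).length : Int) - s)
                  :: pvRuns (cases.dropWhile (· == cc)) (i + (cases.takeWhile (· == cc)).length)).map
                (fun r => PySem.Int.floordiv (2 * r.2.1 + r.2.2 - 1) 2)),
         L ++ (((cc, s, i + ((cases.takeWhile (· == cc)).length : Int) - s)
                  :: pvRuns (cases.dropWhile (· == cc)) (i + (cases.takeWhile (· == cc)).length)).map
                (fun r => PySem.Str.replace r.1 "S1_" ""))) := by
  intro n
  induction n using Nat.strong_induction_on with
  | _ n IH =>
  intro cases hn N i s cc S C L hN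
  have hmem : ∀ x ∈ cases.takeWhile (· == cc), x = cc := by
    intro x hx
    exact eq_of_beq (List.mem_takeWhile_imp (p := (· == cc)) hx)
  have hfold : PySem.List.enumerate cases i
      = PySem.List.enumerate (cases.takeWhile (· == cc)) i
        ++ PySem.List.enumerate (cases.dropWhile (· == cc)) (i + (cases.takeWhile (· == cc)).length) := by
    conv_lhs => rw [← List.takeWhile_append_dropWhile (p := (· == cc)) (l := cases)]
    rw [PySem.List.enumerate_append]
  have hlen : (cases.takeWhile (· == cc)).length + (cases.dropWhile (· == cc)).length = cases.length := by
    have := congrArg List.length (List.takeWhile_append_dropWhile (p := (· == cc)) (l := cases))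
    simp only [List.length_append] at this
    exact this
  rw [hfold, List.foldl_append, foldl_skip _ _ _ hmem]
  cases hd : cases.dropWhile (· == cc) with
  | nil =>
    rw [hd] at hlen
    simp only [List.length_nil, Nat.add_zero] at hlen
    simp only [PySem.List.enumerate_nil, List.foldl_nil, pvRuns, List.map_nil,
      List.append_nil, List.map_cons, pvClose]
    have harg : s + N - 1 = 2 * s + (i + ((cases.takeWhile (· == cc)).length : Int) - s) - 1 := by
      omega
    rw [harg]
  | cons c' rest' =>
    rw [hd] at hlen
    simp only [List.length_cons] at hlen
    have hne : ¬ (c' = cc) := by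
      have h1 := List.head_dropWhile_not (p := (· == cc)) (l := cases) (by simp [hd])
      simp only [hd, List.head_cons] at h1
      exact fun h => by simp [h] at h1
    rw [PySem.List.enumerate_cons, List.foldl_cons]
    have hstep : pvStepC (S, C, L, some cc, s) (i + ((cases.takeWhile (· == cc)).length : Int), c')
        = (S ++ [i + ((cases.takeWhile (· == cc)).length : Int)],
           C ++ [PySem.Int.floordiv (s + (i + ((cases.takeWhile (· == cc)).length : Int)) - 1) 2],
           L ++ [PySem.Str.replace cc "S1_" ""], some c',
           i + ((cases.takeWhile (· == cc)).length : Int)) := by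
      simp [pvStepC, hne]
    rw [hstep]
    rw [IH rest'.length (by omega) rest' rfl N
      (i + ((cases.takeWhile (· == cc)).length : Int) + 1)
      (i + ((cases.takeWhile (· == cc)).length : Int)) c' _ _ _ (by omega)]
    rw [pvRuns]
    simp only [List.map_cons, List.append_assoc, List.cons_append, List.nil_append]
    ring_nf

theorem case_boundaries_eq_close (pf : List (List (String × String))) :
    case_boundaries pf
      = pvClose (pf.length) ((PySem.List.enumerate pf).foldl pvAStep ([], [], [], none, 0)) := by
  unfold case_boundaries pvClose
  rcases ((PySem.List.enumerate pf).foldl pvAStep ([], [], [], none, 0)) with ⟨S, C, L, o, st⟩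
  cases o <;> rfl

-- A equals the run-derived triple
theorem case_boundaries_eq_runsOut (pf : List (List (String × String))) :
    case_boundaries pf = pvRunsOut (pf.map pvCaseOfA) := by
  rw [case_boundaries_eq_close]
  cases pf with
  | nil => simp [pvClose, pvRunsOut, PySem.List.enumerate, pvRuns]
  | cons r rs =>
    rw [show PySem.List.enumerate (r :: rs) 0 = (0, r) :: PySem.List.enumerate rs 1 from by
      rw [PySem.List.enumerate_cons]; norm_num]
    rw [List.foldl_cons]
    rw [show pvAStep ([], [], [], none, 0) (0, r) = ([], [], [], some (pvCaseOfA r), 0) from rfl]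
    rw [foldl_enumerate_map]
    rw [pvMainAux (rs.map pvCaseOfA).length (rs.map pvCaseOfA) rfl (((r :: rs).length : Nat) : Int)
      1 0 (pvCaseOfA r) [] [] [] (by simp; omega)]
    unfold pvRunsOut
    rw [show (r :: rs).map pvCaseOfA = pvCaseOfA r :: rs.map pvCaseOfA from rfl]
    rw [pvRuns]
    simp only [List.nil_append, List.drop_succ_cons, List.drop_zero, List.map_cons]
    ring_nf

-- the zip-adjacent filterMaps of B compute pvChg / pvFch
theorem filterMap_enum_zip_eq_chg (p : String) (l : List String) (i : Int) :
    (PySem.List.enumerate ((p :: l).zip l) i).filterMap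
        (fun q => if q.2.2 ≠ q.2.1 then some q.1 else none)
      = pvChg p l i := by
  induction l generalizing p i with
  | nil => rfl
  | cons c rest ih =>
    simp only [List.zip_cons_cons, PySem.List.enumerate_cons, List.filterMap_cons, pvChg]
    by_cases h : c = p
    · subst h
      simp only [ne_eq, not_true_eq_false, if_false]
      exact ih c (i + 1)
    · simp only [ne_eq, h, not_false_iff, if_true]
      rw [ih c (i + 1)]

theorem filterMap_zip_eq_fch (p : String) (l : List String) :
    ((p :: l).zip l).filterMap (fun q => if q.2 ≠ q.1 then some q.2 else none)
      = pvFch p l := by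
  induction l generalizing p with
  | nil => rfl
  | cons c rest ih =>
    simp only [List.zip_cons_cons, List.filterMap_cons, pvFch]
    by_cases h : c = p
    · subst h
      simp only [ne_eq, not_true_eq_false, if_false]
      exact ih c
    · simp only [ne_eq, h, not_false_iff, if_true]
      rw [ih c]

-- change indices / segment heads skip a constant run
theorem pvChg_const_prefix (t : List String) (cc : String) (h : ∀ x ∈ t, x = cc) :
    ∀ (d : List String) (i : Int), pvChg cc (t ++ d) i = pvChg cc d (i + t.length) := by
  induction t with
  | nil => intro d i; simp
  | cons x xs ih =>
    intro d i
    have hx : x = cc := h x (by simp)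
    simp only [List.cons_append, pvChg, hx, ne_eq, not_true_eq_false, if_false]
    rw [ih (fun y hy => h y (List.mem_cons_of_mem x hy)) d (i + 1)]
    congr 1
    simp only [List.length_cons]
    push_cast
    ring

theorem pvFch_const_prefix (t : List String) (cc : String) (h : ∀ x ∈ t, x = cc) :
    ∀ (d : List String), pvFch cc (t ++ d) = pvFch cc d := by
  induction t with
  | nil => intro d; simp
  | cons x xs ih =>
    intro d
    have hx : x = cc := h x (by simp)
    simp only [List.cons_append, pvFch, hx, ne_eq, not_true_eq_false, if_false]
    exact ih (fun y hy => h y (List.mem_cons_of_mem x hy)) d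

-- the run list, projected three ways, in terms of pvChg / pvFch
theorem pvRuns_proj : ∀ (n : Nat) (l : List String), l.length = n → ∀ (p : String) (s : Int),
    ((pvRuns (p :: l) s).drop 1).map (fun r => r.2.1) = pvChg p l (s + 1)
    ∧ (pvRuns (p :: l) s).map (fun r => r.1) = p :: pvFch p l
    ∧ (pvRuns (p :: l) s).map (fun r => (r.2.1, r.2.1 + r.2.2))
        = (s :: pvChg p l (s + 1)).zip (pvChg p l (s + 1) ++ [s + 1 + l.length]) := by
  intro n
  induction n using Nat.strong_induction_on with
  | _ n IH =>
  intro l hn p s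
  have hmem : ∀ x ∈ l.takeWhile (· == p), x = p := by
    intro x hx
    exact eq_of_beq (List.mem_takeWhile_imp (p := (· == p)) hx)
  have hlen : (l.takeWhile (· == p)).length + (l.dropWhile (· == p)).length = l.length := by
    have := congrArg List.length (List.takeWhile_append_dropWhile (p := (· == p)) (l := l))
    simp only [List.length_append] at this
    exact this
  have hsplit : l = l.takeWhile (· == p) ++ l.dropWhile (· == p) :=
    (List.takeWhile_append_dropWhile (p := (· == p)) (l := l)).symm
  have hchg : pvChg p l (s + 1) = pvChg p (l.dropWhile (· == p)) (s + 1 + (l.takeWhile (· == p)).length) := by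
    conv_lhs => rw [hsplit]
    exact pvChg_const_prefix _ _ hmem _ _
  have hfch : pvFch p l = pvFch p (l.dropWhile (· == p)) := by
    conv_lhs => rw [hsplit]
    exact pvFch_const_prefix _ _ hmem _
  rw [pvRuns]
  cases hd : l.dropWhile (· == p) with
  | nil =>
    rw [hd] at hlen
    simp only [List.length_nil, Nat.add_zero] at hlen
    rw [hd] at hchg hfch
    simp only [pvChg] at hchg
    simp only [pvFch] at hfch
    refine ⟨by simp [pvRuns, hchg], by simp [pvRuns, hfch], ?_⟩
    simp only [pvRuns, hd, List.map_cons, List.map_nil, hchg]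
    simp only [List.nil_append, List.zip_cons_cons, List.zip_nil_left]
    congr 2
    omega
  | cons c' rest' =>
    rw [hd] at hlen
    simp only [List.length_cons] at hlen
    have hne : ¬ (c' = p) := by
      have h1 := List.head_dropWhile_not (p := (· == p)) (l := l) (by simp [hd])
      simp only [hd, List.head_cons] at h1
      exact fun h => by simp [h] at h1
    rw [hd] at hchg hfch
    simp only [pvChg, ne_eq, hne, not_false_iff, if_true] at hchg
    simp only [pvFch, ne_eq, hne, not_false_iff, if_true] at hfch
    obtain ⟨ih1, ih2, ih3⟩ := IH rest'.length (by omega) rest' rfl c'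
      (s + (1 + ((l.takeWhile (· == p)).length : Int)))
    have ea : s + (1 + ((l.takeWhile (· == p)).length : Int)) = s + 1 + ((l.takeWhile (· == p)).length : Int) := by ring
    constructor
    · simp only [List.drop_one, List.tail_cons, hchg]
      rw [show (pvRuns (c' :: rest') (s + (1 + ((l.takeWhile (· == p)).length : Int)))).map (fun r => r.2.1)
            = (s + (1 + ((l.takeWhile (· == p)).length : Int)))
              :: ((pvRuns (c' :: rest') (s + (1 + ((l.takeWhile (· == p)).length : Int)))).drop 1).map (fun r => r.2.1) from by
        rw [pvRuns]; simp]
      rw [ih1, ea]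
    constructor
    · simp only [List.map_cons, hfch]
      rw [ih2]
    · simp only [List.map_cons, hchg]
      rw [ih3, ea]
      have e2 : s + 1 + ((l.takeWhile (· == p)).length : Int) + 1 + (rest'.length : Int)
          = s + 1 + (l.length : Int) := by omega
      rw [e2]
      simp only [List.zip_cons_cons, List.cons_append]
-- zip truncates the unmatched last boundary on the left
theorem pvZipConsAppend (x : Int) (xs : List Int) (E : Int) :
    ((x :: xs) ++ [E]).zip (xs ++ [E]) = (x :: xs).zip (xs ++ [E]) := by
  induction xs generalizing x with
  | nil => rfl
  | cons y ys ih =>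
    simp only [List.cons_append, List.zip_cons_cons]
    rw [← List.cons_append, ih y]

-- B equals the run-derived triple
theorem case_boundaries_alt_eq_runsOut (pf : List (List (String × String))) :
    case_boundaries_alt pf = pvRunsOut (pf.map pvCaseOfB) := by
  unfold case_boundaries_alt
  cases hpf : pf.map pvCaseOfB with
  | nil => simp [pvRunsOut, pvRuns]
  | cons c0 rest =>
    obtain ⟨h1, h2, h3⟩ := pvRuns_proj rest.length rest rfl c0 0
    simp only [zero_add] at h1 h3
    simp only
    rw [show (c0 :: rest).drop 1 = rest from rfl]
    rw [filterMap_enum_zip_eq_chg c0 rest 1, filterMap_zip_eq_fch c0 rest]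
    have hE : (((c0 :: rest).length : Nat) : Int) = 1 + (rest.length : Int) := by
      simp only [List.length_cons]; push_cast; ring
    unfold pvRunsOut
    refine congrArg₂ Prod.mk ?_ (congrArg₂ Prod.mk ?_ ?_)
    · exact h1.symm
    · -- centers
      rw [hE]
      simp only [show ∀ (x : Int) (xs ys : List Int), List.drop 1 ((x :: xs) ++ ys) = xs ++ ys
        from fun _ _ _ => rfl]
      rw [pvZipConsAppend, ← h3, List.map_map]
      apply List.map_congr_left
      intro r _
      simp only [Function.comp]
      congr 1
      ring
    · -- labels
      rw [show (fun r : String × Int × Int => PySem.Str.replace r.1 "S1_" "")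
            = ((fun c => PySem.Str.replace c "S1_" "") ∘ (fun r : String × Int × Int => r.1)) from rfl]
      rw [← List.map_map, h2]

theorem case_boundaries_spec : Claim_equal_case_boundaries := by
  intro per_frame _ _
  show case_boundaries per_frame = case_boundaries_alt per_frame
  rw [case_boundaries_eq_runsOut, case_boundaries_alt_eq_runsOut]
  rfl
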